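-- pv_equiv track=rewrite | github.com/batteryouo/TEL2025_NCHU | ros2_ws/src/target_detect/target_detect/target_detect_node.py | yoloClustering
-- ===== SOURCE A (Python) =====
-- def yoloClustering(holes_list):
--
--     holes_sorted = sorted(holes_list, key=lambda p: p[0])
--     gaps = []
--     for i in range(len(holes_sorted) - 1):
--         gap_value = holes_sorted[i+1][0] - holes_sorted[i][0]
--         gaps.append((gap_value, i))
--     gaps.sort(key=lambda x: x[0], reverse=True)
--     top_2_gaps = [gaps[0], gaps[1]]
--     split_indices = sorted([g[1] for g in top_2_gaps])
--     idx1 = split_indices[0]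
--     idx2 = split_indices[1]
--
--     left_group = holes_sorted[ : idx1 + 1]
--     mid_group = holes_sorted[idx1 + 1 : idx2 + 1]
--     right_group = holes_sorted[idx2 + 1 : ]
--
--     targetGroups = [left_group, mid_group, right_group]
--
--     return targetGroups
-- ===== SOURCE B (Python) =====
-- def yoloClustering(holes_list):
--     hs = sorted(holes_list, key=lambda p: p[0])
--     best = None
--     second = None
--     for i in range(len(hs) - 1):
--         g = hs[i + 1][0] - hs[i][0]
--         if best is None or g > best[0]:
--             best, second = (g, i), best
--         elif second is None or g > second[0]:
--             second = (g, i)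
--     idx1, idx2 = sorted([best[1], second[1]])
--     return [hs[:idx1 + 1], hs[idx1 + 1:idx2 + 1], hs[idx2 + 1:]]
-- ===== Notes on version B (the rewrite author's own statement) =====
-- stated objective: simpler
-- what changed: B drops the materialised gap list and its descending sort + top-2 indexing, replacing them with a single linear pass that keeps the best and second-best gap (strict '>' so the earliest index wins ties, exactly matching the stable sort's tie-breaking).
import Mathlib
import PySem

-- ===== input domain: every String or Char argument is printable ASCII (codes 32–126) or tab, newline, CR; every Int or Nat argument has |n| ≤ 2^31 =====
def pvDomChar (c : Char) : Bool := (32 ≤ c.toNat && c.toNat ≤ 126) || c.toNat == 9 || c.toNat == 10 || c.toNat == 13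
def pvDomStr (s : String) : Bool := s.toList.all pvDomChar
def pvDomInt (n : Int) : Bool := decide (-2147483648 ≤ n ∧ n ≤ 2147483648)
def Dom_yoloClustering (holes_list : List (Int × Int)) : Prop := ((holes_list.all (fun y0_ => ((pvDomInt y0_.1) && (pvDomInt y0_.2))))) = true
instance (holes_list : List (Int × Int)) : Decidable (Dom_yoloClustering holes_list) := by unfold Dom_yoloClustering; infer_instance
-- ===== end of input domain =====

-- B replaces A's build-all-gaps + descending sort + take-top-2 by a single linear top-2 scan
-- over the consecutive gaps (objective: simpler; strict '>' updates reproduce the stable sort's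
-- tie-breaking exactly).

-- ===== PORT A =====
def yoloClustering (holes_list : List (Int × Int)) : List (List (Int × Int)) :=
  let holes_sorted := PySem.List.sorted holes_list (fun p => p.1) false
  let gaps := (PySem.List.pyRange 0 ((holes_sorted.length : Int) - 1) 1).foldl
      (fun acc i =>
        let gap_value := (PySem.List.pyGetD holes_sorted (i + 1) (0, 0)).1
                       - (PySem.List.pyGetD holes_sorted i (0, 0)).1
        acc ++ [(gap_value, i)]) []
  let gaps_sorted := PySem.List.sorted gaps (fun x => x.1) true
  -- top_2_gaps = [gaps[0], gaps[1]]: IndexError (none) when fewer than two gaps → outside Pre_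
  match PySem.List.pyGet? gaps_sorted 0 with
  | none => []
  | some g0 =>
  match PySem.List.pyGet? gaps_sorted 1 with
  | none => []
  | some g1 =>
    let split_indices := PySem.List.sorted [g0.2, g1.2] (fun x => x) false
    let idx1 := PySem.List.pyGetD split_indices 0 0
    let idx2 := PySem.List.pyGetD split_indices 1 0
    [PySem.List.slice holes_sorted none (some (idx1 + 1)),
     PySem.List.slice holes_sorted (some (idx1 + 1)) (some (idx2 + 1)),
     PySem.List.slice holes_sorted (some (idx2 + 1)) none]

-- ===== PORT B =====
-- one loop step of Source B: update (best, second) with the gap at index i (strict '>' so the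
-- earliest index wins ties)
def pvStepB (hs : List (Int × Int)) (st : Option (Int × Int) × Option (Int × Int)) (i : Int) :
    Option (Int × Int) × Option (Int × Int) :=
  let g := (PySem.List.pyGetD hs (i + 1) (0, 0)).1 - (PySem.List.pyGetD hs i (0, 0)).1
  match st with
  | (none, _) => (some (g, i), none)          -- best is None (then second is the old best = None)
  | (some b, sec) =>
    if b.1 < g then (some (g, i), some b)     -- g > best[0]
    else
      match sec with
      | none => (some b, some (g, i))         -- second is None
      | some s => if s.1 < g then (some b, some (g, i)) else (some b, some s)

def yoloClustering_alt (holes_list : List (Int × Int)) : List (List (Int × Int)) :=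
  let hs := PySem.List.sorted holes_list (fun p => p.1) false
  let st := (PySem.List.pyRange 0 ((hs.length : Int) - 1) 1).foldl (pvStepB hs) (none, none)
  -- best[1] / second[1] fail (TypeError, i.e. none here) when fewer than two gaps → outside Pre_
  match st with
  | (some b, some s) =>
    let si := PySem.List.sorted [b.2, s.2] (fun x => x) false
    let idx1 := PySem.List.pyGetD si 0 0
    let idx2 := PySem.List.pyGetD si 1 0
    [PySem.List.slice hs none (some (idx1 + 1)),
     PySem.List.slice hs (some (idx1 + 1)) (some (idx2 + 1)),
     PySem.List.slice hs (some (idx2 + 1)) none]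
  | _ => []

-- ===== PRECONDITION & SPEC =====
-- With fewer than 3 points there are fewer than 2 gaps and Python A raises IndexError
-- (B raises TypeError there): exactly those inputs are excluded.
def Pre_yoloClustering (holes_list : List (Int × Int)) : Prop := 3 ≤ holes_list.length
instance (holes_list : List (Int × Int)) : Decidable (Pre_yoloClustering holes_list) := by
  unfold Pre_yoloClustering; infer_instance
def pvWitness_yoloClustering : (List (Int × Int)) := [(0, 0), (5, 1), (9, 2)]

def Spec_yoloClustering (holes_list : List (Int × Int)) (out : List (List (Int × Int))) : Prop := out = yoloClustering_alt holes_list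
instance (holes_list : List (Int × Int)) (out : List (List (Int × Int))) : Decidable (Spec_yoloClustering holes_list out) := by unfold Spec_yoloClustering; infer_instance

-- ===== CLAIM (what is proved, stated in full; the proofs are below) =====
def Claim_equal_yoloClustering : Prop := ∀ (holes_list : List (Int × Int)), Dom_yoloClustering holes_list → Pre_yoloClustering holes_list → Spec_yoloClustering holes_list (yoloClustering holes_list)

-- ===== LEMMAS AND PROOFS =====

-- the scan step of Source B on a materialised (gap, index) pair
def pvStepP (st : Option (Int × Int) × Option (Int × Int)) (p : Int × Int) :
    Option (Int × Int) × Option (Int × Int) :=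
  match st with
  | (none, _) => (some p, none)
  | (some b, sec) =>
    if b.1 < p.1 then (some p, some b)
    else
      match sec with
      | none => (some b, some p)
      | some s => if s.1 < p.1 then (some b, some p) else (some b, some s)

-- the insertion step of A's stable descending sort
def pvInsD (acc : List (Int × Int)) (p : Int × Int) : List (Int × Int) :=
  PySem.List.insertBy (fun a b => decide (b.1 < a.1)) p acc

lemma pvStepB_eq (hs : List (Int × Int)) (st : Option (Int × Int) × Option (Int × Int)) (i : Int) :
    pvStepB hs st i =
      pvStepP st ((PySem.List.pyGetD hs (i + 1) (0, 0)).1 - (PySem.List.pyGetD hs i (0, 0)).1, i) := by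
  obtain ⟨b, s⟩ := st
  cases b <;> cases s <;> rfl

-- one scan step tracks the first two entries of one insertion step
lemma pvStepP_top2 (acc : List (Int × Int)) (p : Int × Int) :
    pvStepP (acc[0]?, acc[1]?) p = ((pvInsD acc p)[0]?, (pvInsD acc p)[1]?) := by
  cases acc with
  | nil => rfl
  | cons a t =>
    by_cases h : a.1 < p.1
    · simp [pvStepP, pvInsD, PySem.List.insertBy, h]
    · cases t with
      | nil => simp [pvStepP, pvInsD, PySem.List.insertBy, h]
      | cons b t' =>
        by_cases h2 : b.1 < p.1 <;>
          simp [pvStepP, pvInsD, PySem.List.insertBy, h, h2]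

-- the whole scan returns the first two entries of A's descending sort
lemma pvScan_top2 (ps : List (Int × Int)) :
    ∀ acc : List (Int × Int),
      List.foldl pvStepP (acc[0]?, acc[1]?) ps =
        ((List.foldl pvInsD acc ps)[0]?, (List.foldl pvInsD acc ps)[1]?) := by
  induction ps with
  | nil => intro acc; rfl
  | cons p ps ih =>
    intro acc
    simp only [List.foldl_cons, pvStepP_top2]
    exact ih (pvInsD acc p)

lemma pyGet?_zero {α : Type} (xs : List α) : PySem.List.pyGet? xs 0 = xs[0]? := by
  simp only [PySem.List.pyGet?, PySem.List.pyIdx?]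
  split_ifs with h h' <;> simp_all
lemma pyGet?_one {α : Type} (xs : List α) : PySem.List.pyGet? xs 1 = xs[1]? := by
  simp only [PySem.List.pyGet?, PySem.List.pyIdx?]
  split_ifs with h h' <;> simp_all

-- ===== VERDICT (by name: the statement is the Claim_ definition above) =====
theorem yoloClustering_spec : Claim_equal_yoloClustering := by
  intro holes_list _ _
  unfold Spec_yoloClustering yoloClustering yoloClustering_alt
  simp only []
  set hs := PySem.List.sorted holes_list (fun p => p.1) false with hhs
  set f : Int → Int × Int := fun i =>
    ((PySem.List.pyGetD hs (i + 1) (0, 0)).1 - (PySem.List.pyGetD hs i (0, 0)).1, i) with hf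
  have hgaps :
      (PySem.List.pyRange 0 ((hs.length : Int) - 1) 1).foldl
        (fun acc i =>
          let gap_value := (PySem.List.pyGetD hs (i + 1) (0, 0)).1
                         - (PySem.List.pyGetD hs i (0, 0)).1
          acc ++ [(gap_value, i)]) [] =
      (PySem.List.pyRange 0 ((hs.length : Int) - 1) 1).map f := by
    simpa using
      PySem.List.foldl_append_singleton_eq_map f (PySem.List.pyRange 0 ((hs.length : Int) - 1) 1) []
  have hst :
      (PySem.List.pyRange 0 ((hs.length : Int) - 1) 1).foldl (pvStepB hs) (none, none) =
      List.foldl pvStepP (none, none) ((PySem.List.pyRange 0 ((hs.length : Int) - 1) 1).map f) := by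
    rw [List.foldl_map]
    have hfn : pvStepB hs = fun st i => pvStepP st (f i) := by
      funext st i; exact pvStepB_eq hs st i
    rw [hfn]
  rw [hgaps, hst]
  have hsorted := PySem.List.sorted_rev_eq_foldl_insertBy
      ((PySem.List.pyRange 0 ((hs.length : Int) - 1) 1).map f) (fun x : Int × Int => x.1)
  have hins : (fun acc x => PySem.List.insertBy
      (fun a b : Int × Int => decide (b.1 < a.1)) x acc) = pvInsD := by
    funext acc x; rfl
  rw [hins] at hsorted
  have htop := pvScan_top2 ((PySem.List.pyRange 0 ((hs.length : Int) - 1) 1).map f) []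
  simp only [List.getElem?_nil] at htop
  rw [htop, ← hsorted, pyGet?_zero, pyGet?_one]
  cases h0 : (PySem.List.sorted ((PySem.List.pyRange 0 ((hs.length : Int) - 1) 1).map f)
      (fun x : Int × Int => x.1) true)[0]? with
  | none =>
    cases h1 : (PySem.List.sorted ((PySem.List.pyRange 0 ((hs.length : Int) - 1) 1).map f)
        (fun x : Int × Int => x.1) true)[1]? <;> rfl
  | some g0 =>
    cases h1 : (PySem.List.sorted ((PySem.List.pyRange 0 ((hs.length : Int) - 1) 1).map f)
        (fun x : Int × Int => x.1) true)[1]? <;> rfl
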